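-- pv_equiv track=rewrite | github.com/ryanod2014/enigma | extract_city_codes.py | get_first_letter_category
-- ===== SOURCE A (Python) =====
-- CATEGORY_MAP = {
--     1: {"A", "E", "I", "F", "H", "K", "L", "M", "N", "T", "V", "W", "X", "Y", "Z"},
--     2: {"C", "G", "O", "J", "Q", "S", "U"},
--     3: {"B", "D", "P", "R", "J", "U"},
-- }
--
-- def get_first_letter_category(word: str) -> int:
--     """Return the category (1, 2, or 3) for the first letter of the word."""
--     if not word:
--         return 0
--
--     first_letter = word[0].upper()
--     for category, letters in CATEGORY_MAP.items():
--         if first_letter in letters: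
--             return category
--     return 0  # Unknown category
-- ===== SOURCE B (Python) =====
-- # Category per letter A..Z, as a flat table indexed by letter position
-- # (J and U get 2 because CATEGORY_MAP's category-2 set is checked before 3).
-- CATS = [1, 3, 2, 3, 1, 1, 2, 1, 1, 2, 1, 1, 1, 1, 2, 3, 2, 3, 2, 1, 2, 1, 1, 1, 1, 1]
--
-- def get_first_letter_category(word: str) -> int:
--     """Return the category (1, 2, or 3) for the first letter of the word."""
--     if not word:
--         return 0
--     o = ord(word[0])
--     if 97 <= o <= 122:      # manual ASCII uppercase
--         o -= 32
--     if 65 <= o <= 90: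
--         return CATS[o - 65]
--     return 0
-- ===== Notes on version B (the rewrite author's own statement) =====
-- stated objective: simpler
-- what changed: Replaces the per-call scan over three category sets with arithmetic indexing into a flat 26-entry table (manual ASCII uppercasing, then CATS[ord(c)-65]), with J/U pre-resolved to 2 to match A's check order.
import Mathlib
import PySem

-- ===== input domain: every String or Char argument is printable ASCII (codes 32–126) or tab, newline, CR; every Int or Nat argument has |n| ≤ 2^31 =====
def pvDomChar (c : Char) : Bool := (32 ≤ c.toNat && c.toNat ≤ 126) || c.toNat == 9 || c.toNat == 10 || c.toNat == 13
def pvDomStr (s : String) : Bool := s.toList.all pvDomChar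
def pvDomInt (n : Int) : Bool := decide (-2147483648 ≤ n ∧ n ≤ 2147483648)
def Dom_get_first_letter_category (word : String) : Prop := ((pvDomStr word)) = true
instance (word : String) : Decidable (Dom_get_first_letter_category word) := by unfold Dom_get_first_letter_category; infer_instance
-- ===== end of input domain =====

-- B replaces the per-call scan of the three category sets by arithmetic indexing
-- into a flat 26-entry table (manual ASCII uppercase, CATS[ord(c)-65]): simpler per-call work.


-- ===== PORT A =====
-- CATEGORY_MAP: dict 1/2/3 -> set of letters, in insertion order
def pvCategoryMap : List (Int × PySem.Set String) :=
  [(1, PySem.Set.ofList ["A","E","I","F","H","K","L","M","N","T","V","W","X","Y","Z"]),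
   (2, PySem.Set.ofList ["C","G","O","J","Q","S","U"]),
   (3, PySem.Set.ofList ["B","D","P","R","J","U"])]

-- the 'for category, letters in CATEGORY_MAP.items(): if first_letter in letters: return category' loop
def pvFindCat (fl : String) : List (Int × PySem.Set String) → Int
  | [] => 0
  | (cat, letters) :: rest =>
      if PySem.Set.contains letters fl then cat else pvFindCat fl rest

def get_first_letter_category (word : String) : Int :=
  match word.toList with
  | [] => 0
  | c :: _ => pvFindCat (PySem.Str.upper (String.ofList [c])) pvCategoryMap

-- ===== PORT B =====
-- CATS[i] = category of the (i+1)-th letter of the alphabet (J/U pre-resolved to 2)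
def pvCats : List Int :=
  [1, 3, 2, 3, 1, 1, 2, 1, 1, 2, 1, 1, 1, 1, 2, 3, 2, 3, 2, 1, 2, 1, 1, 1, 1, 1]

def get_first_letter_category_alt (word : String) : Int :=
  match word.toList with
  | [] => 0
  | ch :: _ =>
    let o : Int := ch.toNat
    let o : Int := if 97 ≤ o ∧ o ≤ 122 then o - 32 else o
    if 65 ≤ o ∧ o ≤ 90 then
      -- CATS[o-65]: index is in range under the guard, so .getD 0 is never taken
      (PySem.List.pyGet? pvCats (o - 65)).getD 0
    else 0

-- ===== PRECONDITION & SPEC =====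
def Spec_get_first_letter_category (word : String) (out : Int) : Prop := out = get_first_letter_category_alt word
instance (word : String) (out : Int) : Decidable (Spec_get_first_letter_category word out) := by unfold Spec_get_first_letter_category; infer_instance

-- ===== CLAIM (what is proved, stated in full; the proofs are below) =====
def Claim_equal_get_first_letter_category : Prop := ∀ (word : String), Dom_get_first_letter_category word → Spec_get_first_letter_category word (get_first_letter_category word)

-- ===== LEMMAS AND PROOFS =====
-- both ports agree on every possible first character with code < 127
set_option maxRecDepth 100000 in
theorem pv_key : ∀ n : Fin 127,
    get_first_letter_category (String.ofList [Char.ofNat n.val]) =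
      get_first_letter_category_alt (String.ofList [Char.ofNat n.val]) := by
  decide

-- the result depends only on the first character
theorem pv_firstA (c : Char) (cs : List Char) :
    get_first_letter_category (String.ofList (c :: cs)) =
      get_first_letter_category (String.ofList [c]) := by
  simp [get_first_letter_category]

theorem pv_firstB (c : Char) (cs : List Char) :
    get_first_letter_category_alt (String.ofList (c :: cs)) =
      get_first_letter_category_alt (String.ofList [c]) := by
  simp [get_first_letter_category_alt]

-- ===== VERDICT (by name: the statement is the Claim_ definition above) =====
theorem get_first_letter_category_spec : Claim_equal_get_first_letter_category := by
  intro word hdom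
  unfold Spec_get_first_letter_category
  cases h : word.toList with
  | nil =>
    simp [get_first_letter_category, get_first_letter_category_alt, h]
  | cons c cs =>
    have hdc : pvDomChar c = true := by
      have hall : word.toList.all pvDomChar = true := hdom
      rw [h] at hall
      exact (List.all_cons .. ▸ hall |> Bool.and_elim_left)
    have hc : c.toNat < 127 := by
      simp only [pvDomChar, Bool.or_eq_true, Bool.and_eq_true, decide_eq_true_eq, beq_iff_eq] at hdc
      omega
    have hw : word = String.ofList (c :: cs) := by
      have := congrArg String.ofList h
      simpa using this
    rw [hw, pv_firstA, pv_firstB]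
    have hkey := pv_key ⟨c.toNat, hc⟩
    simpa [Char.ofNat_toNat] using hkey
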